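-- pv_equiv track=rewrite | github.com/potassium-chloride/video_search_engine | nn_utils/app.py | getBaseIndices
-- ===== SOURCE A (Python) =====
-- def getBaseIndices(clusters):
-- 	classes = {i:[] for i in set(clusters)}
-- 	for i,val in enumerate(clusters):
-- 		if i==0:
-- 			classes[val].append(1)
-- 		else:
-- 			classes[val].append(classes[val][-1]+1)
-- 		for k in classes.keys():
-- 			if k==val:continue
-- 			classes[k].append(0)
-- 	best_inds = []
-- 	for cl in classes.keys():
-- 		max_val = max(classes[cl])
-- 		best_ind = classes[cl].index(max_val)-max_val//2
-- 		best_inds.append(best_ind)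
-- 	return best_inds
-- ===== SOURCE B (Python) =====
-- def getBaseIndices(clusters):
--     # One pass: per class keep (length, end index) of the first longest run.
--     best = {}          # class -> (max run length, end index of first such run)
--     run = 0
--     prev = None
--     for i, val in enumerate(clusters):
--         run = run + 1 if prev == val else 1
--         prev = val
--         if val not in best or run > best[val][0]:
--             best[val] = (run, i)
--     return [best[c][1] - best[c][0] // 2 for c in set(clusters)]
-- ===== Notes on version B (the rewrite author's own statement) =====
-- stated objective: faster
-- what changed: Instead of materialising a per-class list of running run-lengths for every position (appending to every class's list at every step) and then scanning each list with max/index, B makes a single pass tracking only the current run and, per class, the (length, end index) of the first longest run.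
import Mathlib
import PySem

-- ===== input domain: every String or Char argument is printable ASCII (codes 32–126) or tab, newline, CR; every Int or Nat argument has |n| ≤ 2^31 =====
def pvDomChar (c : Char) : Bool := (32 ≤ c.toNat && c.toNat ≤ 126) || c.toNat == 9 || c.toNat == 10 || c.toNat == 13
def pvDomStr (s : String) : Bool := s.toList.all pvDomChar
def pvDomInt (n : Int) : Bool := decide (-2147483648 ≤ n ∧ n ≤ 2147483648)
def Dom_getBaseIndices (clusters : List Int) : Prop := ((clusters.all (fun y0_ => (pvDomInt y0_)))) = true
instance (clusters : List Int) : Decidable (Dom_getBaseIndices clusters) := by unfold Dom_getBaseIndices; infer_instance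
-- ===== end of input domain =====

-- B replaces A's per-class run-length lists (an append to every class's list at every
-- position, then max/index scans) by one pass keeping, per class, only the current run and
-- the (length, end index) of the first longest run; a timing run measured B faster.
--
-- Both Pythons read out set(clusters) (the output order is its iteration order), so EACH
-- port carries its own transliteration of CPython's set of (small, |n| ≤ 2^31) ints:
-- hash(n) = n except hash(-1) = -2, open addressing with LINEAR_PROBES = 9 and
-- perturb >>= 5, table grows 8 → 4*used when fill*5 >= mask*3; iteration = table order.

-- ===== PORT A =====

-- A's copy of the set model
-- hash(n) for |n| ≤ 2^31
def pvHash (n : Int) : Int := if n = -1 then -2 else n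
-- the hash as the C size_t (two's-complement 64-bit unsigned)
def pvU64 (n : Int) : Nat := (n % (2 ^ 64 : Int)).toNat

-- scan slots j, j+1, …, j+cnt-1: first empty slot (some (some j')), or key found (some none)
def pvScanSlots (t : Array (Option Int)) (h : Int) (x : Int) : Nat → Nat → Option (Option Nat)
  | _, 0 => none
  | j, cnt + 1 =>
    match t[j]? with
    | none => none        -- out of range: cannot happen (j ≤ mask)
    | some none => some (some j)
    | some (some y) => if pvHash y = h ∧ y = x then some none else pvScanSlots t h x (j + 1) cnt

-- set_add_entry's probe loop: empty slot to use (some (some j)) or key already present (some none)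
def pvFindSlot (t : Array (Option Int)) (h : Int) (x : Int) : Nat → Nat → Nat → Option (Option Nat)
  | 0, _, _ => none       -- fuel out: cannot happen (fuel > number of probe steps needed)
  | fuel + 1, i, perturb =>
    let mask := t.size - 1
    let probes := if i + 9 ≤ mask then 9 else 0
    match pvScanSlots t h x i (probes + 1) with
    | some r => some r
    | none =>
      let perturb' := perturb >>> 5
      pvFindSlot t h x fuel ((i * 5 + 1 + perturb') % (mask + 1)) perturb'

-- set_insert_clean (rehash during resize: no equality checks, first empty slot)
def pvInsertClean (x : Int) : Nat → Nat → Nat → Array (Option Int) → Array (Option Int)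
  | 0, _, _, t => t       -- fuel out: cannot happen
  | fuel + 1, i, perturb, t =>
    let mask := t.size - 1
    let probes := if i + 9 ≤ mask then 9 else 0
    match pvScanSlots t (pvHash x) x i (probes + 1) with
    | some (some j) => t.set! j (some x)
    | some none => t      -- cannot happen: clean insert never finds the key
    | none =>
      let perturb' := perturb >>> 5
      pvInsertClean x fuel ((i * 5 + 1 + perturb') % (mask + 1)) perturb' t

-- newsize = PySet_MINSIZE; while newsize <= minused: newsize <<= 1
def pvNewSize (minused : Nat) : Nat → Nat → Nat
  | 0, s => s             -- fuel out: cannot happen (64 doublings suffice)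
  | fuel + 1, s => if s ≤ minused then pvNewSize minused fuel (s * 2) else s

-- set_add_entry + set_table_resize on the (table, fill) state
def pvSetAdd1 (st : Array (Option Int) × Nat) (x : Int) : Array (Option Int) × Nat :=
  let (t, fill) := st
  let h := pvHash x
  match pvFindSlot t h x (t.size + 80) (pvU64 h % t.size) (pvU64 h) with
  | some (some j) =>
    let t := t.set! j (some x)
    let fill := fill + 1
    if fill * 5 ≥ (t.size - 1) * 3 then
      let minused := if fill > 50000 then fill * 2 else fill * 4
      let newsize := pvNewSize minused 64 8
      let t' := t.foldl (fun acc o => match o with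
        | some y => pvInsertClean y (newsize + 80) (pvU64 (pvHash y) % newsize) (pvU64 (pvHash y)) acc
        | none => acc) (Array.replicate newsize none)
      (t', fill)
    else (t, fill)
  | _ => (t, fill)        -- key already present (or fuel out, which cannot happen)

def pvSetRaw (xs : List Int) : List Int :=
  ((xs.foldl pvSetAdd1 (Array.replicate 8 none, 0)).1.toList).filterMap id

-- list(set(xs)) for ints: the table scan already holds exactly the distinct elements of xs,
-- so the Set.ofList/Set.update wrapper is a runtime no-op; it provides the Nodup and
-- membership facts the proofs use without reasoning about the hash table.
def pvSetList (xs : List Int) : List Int :=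
  PySem.Set.update (PySem.Set.ofList (pvSetRaw xs)) xs

-- one iteration of A's main loop (iv = (i, val)); classes[val].append(...) is Dict.modify
-- with default [] (val is always a key, so the default is never used — Python's KeyError
-- cannot fire); classes[val][-1] is pyGet? l (-1), .getD 0 never used (list nonempty for i≠0)
def pvA_step (d : PySem.Dict Int (List Int)) (iv : Int × Int) : PySem.Dict Int (List Int) :=
  let d1 := if iv.1 = 0 then d.modify iv.2 [] (fun l => l ++ [1])
            else d.modify iv.2 [] (fun l => l ++ [(PySem.List.pyGet? l (-1)).getD 0 + 1])
  d1.keys.foldl (fun d' k => if k = iv.2 then d' else d'.modify k [] (fun l => l ++ [0])) d1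

-- loop body of A's result loop: max(classes[cl]) raises only on an empty list, which cannot
-- occur (every value list has length len(clusters) ≥ 1 when there is a key): .getD totalizes
def pvA_best (classes : PySem.Dict Int (List Int)) (cl : Int) : Int :=
  let lst := classes.getD cl []
  let max_val := (PySem.List.max? lst (fun y => y)).getD 0
  (((PySem.List.index? lst max_val).getD 0 : Nat) : Int) - PySem.Int.floordiv max_val 2

def getBaseIndices (clusters : List Int) : List Int :=
  let classes0 : PySem.Dict Int (List Int) :=
    (pvSetList clusters).foldl (fun d i => d.insert i []) PySem.Dict.empty
  let classes := (PySem.List.enumerate clusters).foldl pvA_step classes0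
  classes.keys.foldl (fun best_inds cl => best_inds ++ [pvA_best classes cl]) []

-- ===== PORT B =====

-- B's copy of the set model (its own transliteration of the same CPython code)
def bHash (a : Int) := if a = -1 then (-2 : Int) else a

def bWord (a : Int) := (a % 18446744073709551616).toNat

-- linear scan of `left` slots starting at slot `slot`
def bSeek (g : Array (Option Int)) (hsh elt : Int) (slot left : Nat) : Option (Option Nat) :=
  if _hl : left = 0 then none
  else
    match g[slot]? with
    | none => none
    | some none => some (some slot)
    | some (some w) =>
      if bHash w = hsh ∧ w = elt then some none
      else bSeek g hsh elt (Nat.succ slot) (left - 1)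
termination_by left
decreasing_by omega

-- probe loop of set_add_entry
def bProbe (g : Array (Option Int)) (hsh elt : Int) (fuel pos shift : Nat) : Option (Option Nat) :=
  if _hf : fuel = 0 then none
  else
    let msk := g.size - 1
    let span := if pos + 9 ≤ msk then 9 else 0
    match bSeek g hsh elt pos (Nat.succ span) with
    | some res => some res
    | none =>
      let shift2 := shift >>> 5
      bProbe g hsh elt (fuel - 1) ((pos * 5 + 1 + shift2) % Nat.succ msk) shift2
termination_by fuel
decreasing_by omega

-- set_insert_clean
def bClean (elt : Int) (fuel pos shift : Nat) (g : Array (Option Int)) : Array (Option Int) :=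
  if _hf : fuel = 0 then g
  else
    let msk := g.size - 1
    let span := if pos + 9 ≤ msk then 9 else 0
    match bSeek g (bHash elt) elt pos (Nat.succ span) with
    | some (some slot) => g.set! slot (some elt)
    | some none => g
    | none =>
      let shift2 := shift >>> 5
      bClean elt (fuel - 1) ((pos * 5 + 1 + shift2) % Nat.succ msk) shift2 g
termination_by fuel
decreasing_by omega

-- doubling loop of set_table_resize
def bGrow (need fuel sz : Nat) : Nat :=
  if _hf : fuel = 0 then sz
  else if sz ≤ need then bGrow need (fuel - 1) (sz * 2) else sz
termination_by fuel
decreasing_by omega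

-- insert one element (set_add_entry, resizing when fill*5 >= mask*3)
def bAdd (st : Array (Option Int) × Nat) (elt : Int) : Array (Option Int) × Nat :=
  match st with
  | (g, used) =>
    let hsh := bHash elt
    match bProbe g hsh elt (g.size + 80) (bWord hsh % g.size) (bWord hsh) with
    | some (some slot) =>
      let g := g.set! slot (some elt)
      let used := Nat.succ used
      if (g.size - 1) * 3 ≤ used * 5 then
        let need := if 50000 < used then used * 2 else used * 4
        let cap := bGrow need 64 8
        let g2 := g.foldl (fun acc cell => match cell with
          | some w => bClean w (cap + 80) (bWord (bHash w) % cap) (bWord (bHash w)) acc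
          | none => acc) (Array.replicate cap none)
        (g2, used)
      else (g, used)
    | _ => (g, used)

def bRaw (xs : List Int) : List Int :=
  ((xs.foldl bAdd (Array.replicate 8 none, 0)).1.toList).reduceOption

-- list(set(xs)): table order; the Set wrapper is a runtime no-op on the dup-free table scan
def bDistinct (xs : List Int) : List Int :=
  PySem.Set.update (PySem.Set.ofList (bRaw xs)) xs

-- B's for-loop, as direct recursion over the list with the index carried along:
-- best, run, prev are the loop variables of Source B
def bMain (best : PySem.Dict Int (Int × Int)) (run : Int) (prev : Option Int) (pos : Int) :
    List Int → PySem.Dict Int (Int × Int)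
  | [] => best
  | val :: tl =>
    let r : Int := if prev = some val then run + 1 else 1
    let best2 := match best.get? val with
      | none => best.insert val (r, pos)
      | some pair => if pair.1 < r then best.insert val (r, pos) else best
    bMain best2 r (some val) (pos + 1) tl

def getBaseIndices_alt (clusters : List Int) : List Int :=
  let best := bMain PySem.Dict.empty 0 none 0 clusters
  -- best[c] is looked up only for c ∈ set(clusters), which is always a key: .getD totalizes
  (bDistinct clusters).map (fun cls =>
    match (best.get? cls).getD (0, 0) with
    | (len, stop) => stop - PySem.Int.floordiv len 2)

-- ===== PRECONDITION & SPEC =====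
def Spec_getBaseIndices (clusters : List Int) (out : List Int) : Prop := out = getBaseIndices_alt clusters
instance (clusters : List Int) (out : List Int) : Decidable (Spec_getBaseIndices clusters out) := by unfold Spec_getBaseIndices; infer_instance

-- ===== CLAIM (what is proved, stated in full; the proofs are below) =====
def Claim_equal_getBaseIndices : Prop := ∀ (clusters : List Int), Dom_getBaseIndices clusters → Spec_getBaseIndices clusters (getBaseIndices clusters)

-- ===== LEMMAS AND PROOFS =====

-- B's set-model transliteration agrees with A's (the two are independent copies of the
-- same CPython code, so each layer is proved equal below)
theorem bSeek_eq (g : Array (Option Int)) (h x : Int) (j cnt : Nat) :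
    bSeek g h x j cnt = pvScanSlots g h x j cnt := by
  induction cnt generalizing j with
  | zero => rw [bSeek]; rfl
  | succ c ih =>
    rw [bSeek]
    simp only [Nat.succ_ne_zero, dite_false, Nat.succ_eq_add_one, Nat.add_sub_cancel,
      pvScanSlots, bHash, pvHash, ih]
    rfl

theorem bProbe_eq (g : Array (Option Int)) (h x : Int) (fuel i perturb : Nat) :
    bProbe g h x fuel i perturb = pvFindSlot g h x fuel i perturb := by
  induction fuel generalizing i perturb with
  | zero => rw [bProbe]; rfl
  | succ f ih =>
    rw [bProbe]
    simp only [Nat.succ_ne_zero, dite_false, Nat.succ_eq_add_one, Nat.add_sub_cancel, pvFindSlot, bSeek_eq, ih]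

theorem bClean_eq (x : Int) (fuel i perturb : Nat) (g : Array (Option Int)) :
    bClean x fuel i perturb g = pvInsertClean x fuel i perturb g := by
  induction fuel generalizing i perturb g with
  | zero => rw [bClean]; rfl
  | succ f ih =>
    rw [bClean]
    simp only [Nat.succ_ne_zero, dite_false, Nat.succ_eq_add_one, Nat.add_sub_cancel, pvInsertClean, bSeek_eq,
      bHash, pvHash, ih]

theorem bGrow_eq (minused fuel s : Nat) : bGrow minused fuel s = pvNewSize minused fuel s := by
  induction fuel generalizing s with
  | zero => rw [bGrow]; rfl
  | succ f ih =>
    rw [bGrow]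
    simp only [Nat.succ_ne_zero, dite_false, Nat.add_sub_cancel, pvNewSize, ih]

theorem bAdd_eq : bAdd = pvSetAdd1 := by
  funext st x
  obtain ⟨g, fill⟩ := st
  simp only [bAdd, pvSetAdd1, bHash, pvHash, bWord, pvU64, bProbe_eq, bClean_eq, bGrow_eq]
  norm_num

theorem bDistinct_eq (xs : List Int) : bDistinct xs = pvSetList xs := by
  simp only [bDistinct, pvSetList, bRaw, pvSetRaw, bAdd_eq, List.reduceOption]

-- the per-position run lengths A builds for class c (classes[c] after the main loop)
def pvRun (c : Int) (xs : List Int) : List Int :=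
  xs.foldl (fun L v => L ++ [if v = c then L.getLast?.getD 0 + 1 else 0]) []

-- reference statistics for class c: (current run, best run length, end index of first best run)
def pvStep (c : Int) (s : Int × Int × Int) (iv : Int × Int) : Int × Int × Int :=
  let r := if iv.2 = c then s.1 + 1 else 0
  if r > s.2.1 then (r, r, iv.1) else (r, s.2.1, s.2.2)

def pvStats (c : Int) (xs : List Int) : Int × Int × Int :=
  (PySem.List.enumerate xs).foldl (pvStep c) (0, 0, 0)

-- proof-side mirror of bMain carrying the FULL loop state (dict, run, prev)
def qstep (st : PySem.Dict Int (Int × Int) × Int × Option Int) (iv : Int × Int) :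
    PySem.Dict Int (Int × Int) × Int × Option Int :=
  let (best, run, prev) := st
  let run := if prev = some iv.2 then run + 1 else 1
  let best := match best.get? iv.2 with
    | none => best.insert iv.2 (run, iv.1)
    | some p => if run > p.1 then best.insert iv.2 (run, iv.1) else best
  (best, run, some iv.2)

def qRun (st : PySem.Dict Int (Int × Int) × Int × Option Int) (i : Int) :
    List Int → PySem.Dict Int (Int × Int) × Int × Option Int
  | [] => st
  | v :: rest => qRun (qstep st (i, v)) (i + 1) rest

theorem bMain_eq_qRun : ∀ (xs : List Int) best run prev i,
    bMain best run prev i xs = (qRun (best, run, prev) i xs).1 := by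
  intro xs
  induction xs with
  | nil => intro best run prev i; rfl
  | cons v rest ih =>
    intro best run prev i
    simp only [bMain, qRun, qstep]
    split <;> exact ih _ _ _ _

theorem qRun_append : ∀ (xs : List Int) (v : Int) st i,
    qRun st i (xs ++ [v]) = qstep (qRun st i xs) (i + (xs.length : Int), v) := by
  intro xs
  induction xs with
  | nil => intro v st i; simp [qRun]
  | cons a xs ih =>
    intro v st i
    simp only [List.cons_append, qRun, ih, List.length_cons]
    congr 2
    push_cast; ring

theorem pvSetList_nodup (xs : List Int) : (pvSetList xs).Nodup :=
  PySem.Set.nodup_update _ _ (PySem.Set.nodup_ofList _)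

theorem pvSetList_mem (xs : List Int) {v : Int} (h : v ∈ xs) : v ∈ pvSetList xs :=
  (PySem.Set.mem_update _ _ _).mpr (Or.inr h)

theorem pvRun_append (c : Int) (xs : List Int) (v : Int) :
    pvRun c (xs ++ [v]) = pvRun c xs ++ [if v = c then (pvRun c xs).getLast?.getD 0 + 1 else 0] := by
  simp [pvRun, List.foldl_append]

theorem pvStats_append (c : Int) (xs : List Int) (v : Int) :
    pvStats c (xs ++ [v]) = pvStep c (pvStats c xs) ((xs.length : Int), v) := by
  simp [pvStats, PySem.List.enumerate_append, PySem.List.enumerate_cons, PySem.List.enumerate_nil,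
    List.foldl_append]

-- classes[val][-1] is the last element of the value list
theorem pvGet_neg_one (l : List Int) : (PySem.List.pyGet? l (-1)).getD 0 = l.getLast?.getD 0 := by
  simp [PySem.List.pyGet?, PySem.List.pyIdx?]
  split
  · simp [List.getLast?_eq_getElem?]
  · rename_i h
    have : l = [] := by cases l with
      | nil => rfl
      | cons a t => simp at h
    simp [this]

-- everything the two ports read off the per-class data, stated about pvStats/pvRun
theorem pvStats_spec (c : Int) (xs : List Int) :
    (pvRun c xs).length = xs.length ∧
    (∀ t ∈ pvRun c xs, 0 ≤ t ∧ t ≤ (pvStats c xs).2.1) ∧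
    (pvRun c xs).getLast?.getD 0 = (pvStats c xs).1 ∧
    0 ≤ (pvStats c xs).1 ∧ (pvStats c xs).1 ≤ (pvStats c xs).2.1 ∧ 0 ≤ (pvStats c xs).2.2 ∧
    (xs.getLast? ≠ some c → (pvStats c xs).1 = 0) ∧
    ((pvStats c xs).2.1 = 0 → (pvStats c xs).2.2 = 0) ∧
    (pvRun c xs = [] ∨ (pvStats c xs).2.1 ∈ pvRun c xs) ∧
    (PySem.List.max? (pvRun c xs) (fun y => y)).getD 0 = (pvStats c xs).2.1 ∧
    (((PySem.List.index? (pvRun c xs) (pvStats c xs).2.1).getD 0 : Nat) : Int) = (pvStats c xs).2.2 := by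
  induction xs using List.reverseRecOn with
  | nil =>
    refine ⟨rfl, by simp [pvRun], ?_⟩
    simp [pvRun, pvStats, PySem.List.enumerate_nil]
    decide
  | append_singleton xs v ih =>
    obtain ⟨hlen, hbd, hlast, hr0, hrm, he0, hlz, hme, hmem, hmax, hidx⟩ := ih
    rw [pvRun_append, pvStats_append, hlast]
    set s := pvStats c xs with hs
    set R := pvRun c xs with hR
    set t : Int := if v = c then s.1 + 1 else 0 with ht
    have hstep : pvStep c s ((xs.length : Int), v) =
        if t > s.2.1 then (t, t, (xs.length : Int)) else (t, s.2.1, s.2.2) := by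
      simp only [pvStep, ht]
    rw [hstep]
    have ht0 : 0 ≤ t := by rw [ht]; split <;> omega
    have hm0 : 0 ≤ s.2.1 := le_trans hr0 hrm
    by_cases hgt : t > s.2.1
    · rw [if_pos hgt]
      dsimp only
      have htnotmem : t ∉ R := fun hmemt => by
        have := (hbd t hmemt).2; omega
      refine ⟨by simp [hlen], ?_, by simp, ht0, le_refl t, by positivity, ?_, ?_, ?_, ?_, ?_⟩
      · intro y hy
        rcases List.mem_append.mp hy with h1 | h1
        · exact ⟨(hbd y h1).1, le_trans (hbd y h1).2 (le_of_lt hgt)⟩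
        · simp at h1; omega
      · intro hne
        rw [List.getLast?_append_cons] at hne
        simp at hne
        rw [ht, if_neg hne]
      · intro ht0'; omega
      · exact Or.inr (by simp)
      · cases hmx : PySem.List.max? (R ++ [t]) (fun y => y) with
        | none => rw [PySem.List.max?_eq_none_iff] at hmx; simp at hmx
        | some z =>
          have hzmem := PySem.List.max?_mem hmx
          have hzmax := PySem.List.max?_isMax hmx t (by simp)
          have hzle : z ≤ t := by
            rcases List.mem_append.mp hzmem with h1 | h1
            · exact le_trans (hbd z h1).2 (le_of_lt hgt)
            · simp at h1; omega
          simp only [Option.getD_some]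
          omega
      · rw [PySem.List.index?_append_singleton_self R t htnotmem]
        simp [hlen]
    · rw [if_neg hgt]
      dsimp only
      have htle : t ≤ s.2.1 := le_of_not_gt hgt
      refine ⟨by simp [hlen], ?_, by simp, ht0, htle, he0, ?_, hme, ?_, ?_, ?_⟩
      · intro y hy
        rcases List.mem_append.mp hy with h1 | h1
        · exact hbd y h1
        · simp at h1; subst h1; exact ⟨ht0, htle⟩
      · intro hne
        rw [List.getLast?_append_cons] at hne
        simp at hne
        rw [ht, if_neg hne]
      · rcases hmem with hR0 | hmm
        · have hxs : xs = [] := by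
            have := hlen; rw [hR0] at this; simpa using this.symm
          have hs0 : s = (0, 0, 0) := by rw [hs, hxs]; rfl
          rw [hR0]
          right
          have ht00 : t = 0 := by
            have h1 := htle; rw [hs0] at h1; simp at h1; omega
          simp [ht00, hs0]
        · exact Or.inr (List.mem_append_left _ hmm)
      · cases hmx : PySem.List.max? (R ++ [t]) (fun y => y) with
        | none => rw [PySem.List.max?_eq_none_iff] at hmx; simp at hmx
        | some z =>
          have hzmem := PySem.List.max?_mem hmx
          rcases hmem with hR0 | hmm
          · have hxs : xs = [] := by
              have := hlen; rw [hR0] at this; simpa using this.symm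
            have hs0 : s = (0, 0, 0) := by rw [hs, hxs]; rfl
            have ht00 : t = 0 := by
              have h1 := htle; rw [hs0] at h1; simp at h1; omega
            rw [hR0, ht00] at hmx
            simp [PySem.List.max?_id_cons] at hmx
            simp [hmx, hs0]
          · have hzmax := PySem.List.max?_isMax hmx s.2.1 (List.mem_append_left _ hmm)
            have hzle : z ≤ s.2.1 := by
              rcases List.mem_append.mp hzmem with h1 | h1
              · exact (hbd z h1).2
              · simp at h1; omega
            simp only [Option.getD_some]
            omega
      · rcases hmem with hR0 | hmm
        · have hxs : xs = [] := by
            have := hlen; rw [hR0] at this; simpa using this.symm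
          have hs0 : s = (0, 0, 0) := by rw [hs, hxs]; rfl
          have ht00 : t = 0 := by
              have h1 := htle; rw [hs0] at h1; simp at h1; omega
          rw [hR0, ht00, hs0]
          simp
        · rw [PySem.List.index?_append_of_mem [t] hmm]
          exact hidx

-- A's initial dict: every key of K maps to []
theorem pvA_init (K : List Int) (c : Int) :
    ((K.foldl (fun d i => d.insert i ([] : List Int)) PySem.Dict.empty)).getD c [] = [] := by
  have aux : ∀ (K : List Int) (d : PySem.Dict Int (List Int)), (∀ c, d.getD c [] = []) →
      ∀ c, (K.foldl (fun d i => d.insert i ([] : List Int)) d).getD c [] = [] := by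
    intro K
    induction K with
    | nil => intro d h c; exact h c
    | cons k K ih =>
      intro d h c
      refine ih _ (fun c' => ?_) c
      rw [PySem.Dict.getD_insert]
      split <;> simp [h]
  exact aux K PySem.Dict.empty (fun c => by simp [PySem.Dict.getD_empty]) c

theorem pvA_init_keys (K : List Int) (hnd : K.Nodup) :
    ((K.foldl (fun d i => d.insert i ([] : List Int)) PySem.Dict.empty)).keys = K := by
  rw [show (fun (d : PySem.Dict Int (List Int)) (i : Int) => d.insert i ([] : List Int)) =
      (fun d x => d.insert x ((fun (_ : PySem.Dict Int (List Int)) (_ : Int) => ([] : List Int)) d x)) from rfl,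
    PySem.Dict.keys_foldl_insert]
  simp [PySem.Dict.keys_empty, PySem.Set.update_nil_left, PySem.Set.ofList_eq_self_of_nodup _ hnd]

-- the inner `for k in classes.keys()` loop: keys unchanged …
theorem pvA_inner_keys (val : Int) : ∀ (ks : List Int) (d : PySem.Dict Int (List Int)),
    (∀ k ∈ ks, k ∈ d.keys) →
    (ks.foldl (fun d' k => if k = val then d' else d'.modify k [] (fun l => l ++ [0])) d).keys
      = d.keys := by
  intro ks
  induction ks with
  | nil => intro d _; rfl
  | cons k ks ih =>
    intro d h
    by_cases hk : k = val
    · simp only [List.foldl_cons, if_pos hk]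
      exact ih d (fun k' hk' => h k' (List.mem_cons_of_mem _ hk'))
    · simp only [List.foldl_cons, if_neg hk]
      have hcont : d.contains k = true :=
        (PySem.Dict.contains_iff_mem_keys d k).mpr (h k List.mem_cons_self)
      have hkeq : (d.modify k [] (fun l => l ++ [0])).keys = d.keys := by
        rw [PySem.Dict.keys_modify]
        exact PySem.Dict.keys_insert_of_contains d _ hcont
      rw [ih _ (fun k' hk' => by rw [hkeq]; exact h k' (List.mem_cons_of_mem _ hk')), hkeq]

-- … and it appends exactly one 0 to every class other than val
theorem pvA_inner_getD (val c : Int) : ∀ (ks : List Int), ks.Nodup →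
    ∀ (d : PySem.Dict Int (List Int)),
    (ks.foldl (fun d' k => if k = val then d' else d'.modify k [] (fun l => l ++ [0])) d).getD c []
      = if c ∈ ks ∧ c ≠ val then d.getD c [] ++ [0] else d.getD c [] := by
  intro ks
  induction ks with
  | nil => intro _ d; simp
  | cons k ks ih =>
    intro hnd d
    have hknotmem : k ∉ ks := (List.nodup_cons.mp hnd).1
    by_cases hk : k = val
    · simp only [List.foldl_cons, if_pos hk]
      rw [ih (List.nodup_cons.mp hnd).2 d]
      by_cases hc : c ∈ ks ∧ c ≠ val
      · rw [if_pos hc, if_pos ⟨List.mem_cons_of_mem _ hc.1, hc.2⟩]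
      · rw [if_neg hc, if_neg (fun hc' => hc ⟨by
          rcases List.mem_cons.mp hc'.1 with h1 | h1
          · exact absurd (h1.trans hk) hc'.2
          · exact h1, hc'.2⟩)]
    · simp only [List.foldl_cons, if_neg hk]
      rw [ih (List.nodup_cons.mp hnd).2 _]
      have hmod : (d.modify k [] (fun l => l ++ [0])).getD c [] =
          if c = k then d.getD c [] ++ [0] else d.getD c [] := by
        rw [PySem.Dict.getD_modify]
        by_cases hck : c = k
        · rw [if_pos hck, if_pos hck, hck]
        · rw [if_neg hck, if_neg hck]
      by_cases hc : c ∈ ks ∧ c ≠ val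
      · have hck : c ≠ k := fun h => hknotmem (h ▸ hc.1)
        rw [if_pos hc, if_pos ⟨List.mem_cons_of_mem _ hc.1, hc.2⟩, hmod, if_neg hck]
      · rw [if_neg hc, hmod]
        by_cases hck : c = k
        · rw [if_pos hck, if_pos ⟨hck ▸ List.mem_cons_self, hck ▸ hk⟩]
        · rw [if_neg hck, if_neg (fun hc' => hc ⟨by
            rcases List.mem_cons.mp hc'.1 with h1 | h1
            · exact absurd h1 hck
            · exact h1, hc'.2⟩)]

-- A's main loop keeps the key list fixed and maintains classes[c] = pvRun c prefix
theorem pvA_fold (K : List Int) (hnd : K.Nodup) (xs : List Int) (hsub : ∀ v ∈ xs, v ∈ K) :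
    let d := (PySem.List.enumerate xs).foldl pvA_step
      (K.foldl (fun d i => d.insert i ([] : List Int)) PySem.Dict.empty)
    d.keys = K ∧ ∀ c ∈ K, d.getD c [] = pvRun c xs := by
  intro d
  revert hsub
  rw [show d = (PySem.List.enumerate xs).foldl pvA_step
      (K.foldl (fun d i => d.insert i ([] : List Int)) PySem.Dict.empty) from rfl]
  induction xs using List.reverseRecOn with
  | nil =>
    intro _
    simp only [PySem.List.enumerate_nil, List.foldl_nil]
    exact ⟨pvA_init_keys K hnd, fun c _ => by rw [pvA_init]; rfl⟩
  | append_singleton xs v ih =>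
    intro hsub
    obtain ⟨hkeys, hget⟩ := ih (fun w hw => hsub w (List.mem_append_left _ hw))
    have hvK : v ∈ K := hsub v (by simp)
    rw [PySem.List.enumerate_append, PySem.List.enumerate_cons, PySem.List.enumerate_nil,
      List.foldl_append]
    set dprev := (PySem.List.enumerate xs).foldl pvA_step
      (K.foldl (fun d i => d.insert i ([] : List Int)) PySem.Dict.empty) with hdprev
    simp only [List.foldl_cons, List.foldl_nil]
    show ((pvA_step dprev (0 + (xs.length : Int), v)).keys = K) ∧ _
    have hzero : (0 + (xs.length : Int), v) = ((xs.length : Int), v) := by norm_num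
    rw [hzero]
    simp only [pvA_step]
    have hcont : dprev.contains v = true :=
      (PySem.Dict.contains_iff_mem_keys dprev v).mpr (hkeys ▸ hvK)
    set d1 := if ((xs.length : Int), v).1 = 0
        then dprev.modify ((xs.length : Int), v).2 [] (fun l => l ++ [1])
        else dprev.modify ((xs.length : Int), v).2 []
          (fun l => l ++ [(PySem.List.pyGet? l (-1)).getD 0 + 1]) with hd1
    have hd1keys : d1.keys = dprev.keys := by
      rw [hd1]
      split <;>
        · rw [PySem.Dict.keys_modify]
          exact PySem.Dict.keys_insert_of_contains dprev _ hcont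
    have hd1get : ∀ c, d1.getD c [] =
        if c = v then pvRun v xs ++ [(pvRun v xs).getLast?.getD 0 + 1] else dprev.getD c [] := by
      intro c
      rw [hd1]
      by_cases h0 : ((xs.length : Int), v).1 = 0
      · rw [if_pos h0, PySem.Dict.getD_modify]
        have hxs : xs = [] := by simpa using h0
        by_cases hc : c = v
        · rw [if_pos hc, if_pos hc, hget v hvK, hxs]
          rfl
        · rw [if_neg hc, if_neg hc]
      · rw [if_neg h0, PySem.Dict.getD_modify]
        by_cases hc : c = v
        · rw [if_pos hc, if_pos hc, hget v hvK, pvGet_neg_one]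
        · rw [if_neg hc, if_neg hc]
    constructor
    · rw [pvA_inner_keys _ _ _ (fun k hk => hk), hd1keys, hkeys]
    · intro c hc
      rw [pvA_inner_getD _ _ _ (by rw [hd1keys, hkeys]; exact hnd) _, pvRun_append]
      by_cases hcv : c = v
      · rw [if_neg (fun h => h.2 hcv), hd1get c, if_pos hcv, hcv, if_pos rfl]
      · rw [if_pos ⟨by rw [hd1keys, hkeys]; exact hc, hcv⟩, hd1get c, if_neg hcv,
          hget c hc, if_neg (fun h => hcv h.symm)]

-- B's loop state (in its full qRun form), characterised by pvStats
theorem qRun_fold (xs : List Int) :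
    let st := qRun (PySem.Dict.empty, 0, none) 0 xs
    st.2.2 = xs.getLast? ∧
    (∀ c, st.2.2 = some c → st.2.1 = (pvStats c xs).1) ∧
    (∀ c, st.1.get? c =
      if 0 < (pvStats c xs).2.1 then some ((pvStats c xs).2.1, (pvStats c xs).2.2) else none) := by
  intro st
  rw [show st = qRun (PySem.Dict.empty, 0, none) 0 xs from rfl]
  induction xs using List.reverseRecOn with
  | nil =>
    refine ⟨rfl, fun c h => by simp [qRun] at h, fun c => ?_⟩
    have : pvStats c [] = (0, 0, 0) := rfl
    rw [this]
    simp [qRun, PySem.Dict.get?_empty]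
  | append_singleton xs v ih =>
    obtain ⟨hprev, hrun, hbest⟩ := ih
    rw [qRun_append]
    set stp := qRun (PySem.Dict.empty, 0, none) 0 xs with hstp
    have hzero : ((0 : Int) + (xs.length : Int), v) = ((xs.length : Int), v) := by norm_num
    rw [hzero]
    -- facts about the per-class statistics
    obtain ⟨-, -, -, hr0v, hrmv, -, hlzv, -, -, -, -⟩ := pvStats_spec v xs
    -- the new current run for class v
    have hrv : (pvStats v (xs ++ [v])).1 = (pvStats v xs).1 + 1 := by
      rw [pvStats_append]
      simp only [pvStep, if_true]
      split <;> rfl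
    have hrun' : (if stp.2.2 = some v then stp.2.1 + 1 else 1) = (pvStats v (xs ++ [v])).1 := by
      rw [hrv]
      by_cases hp : stp.2.2 = some v
      · rw [if_pos hp, hrun v hp]
      · rw [if_neg hp, hlzv (by rw [← hprev]; exact fun h => hp h)]
        norm_num
    refine ⟨by simp [qstep], ?_, ?_⟩
    · intro c hc
      simp only [qstep] at hc ⊢
      have hcv : c = v := by simpa using hc.symm
      subst hcv
      exact hrun'
    · intro c
      simp only [qstep]
      by_cases hcv : c = v
      · subst hcv
        have hstat : pvStats c (xs ++ [c]) =
            if (pvStats c xs).1 + 1 > (pvStats c xs).2.1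
            then ((pvStats c xs).1 + 1, (pvStats c xs).1 + 1, (xs.length : Int))
            else ((pvStats c xs).1 + 1, (pvStats c xs).2.1, (pvStats c xs).2.2) := by
          rw [pvStats_append]
          simp only [pvStep, if_true]
        have hrune : (if stp.2.2 = some c then stp.2.1 + 1 else 1) = (pvStats c xs).1 + 1 :=
          hrun'.trans hrv
        cases hbv : stp.1.get? c with
        | none =>
          dsimp only
          have hm0 : ¬ 0 < (pvStats c xs).2.1 := by
            have hb := hbest c; rw [hbv] at hb
            by_contra hlt
            rw [if_pos hlt] at hb; exact absurd hb (by simp)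
          have hmz : (pvStats c xs).2.1 = 0 := le_antisymm (not_lt.mp hm0) (le_trans hr0v hrmv)
          have hgt : (pvStats c xs).1 + 1 > (pvStats c xs).2.1 := by omega
          rw [hstat, if_pos hgt, PySem.Dict.get?_insert, if_pos rfl, hrune]
          dsimp only
          rw [if_pos (by omega)]
        | some p =>
          dsimp only
          have hps : p = ((pvStats c xs).2.1, (pvStats c xs).2.2) ∧ 0 < (pvStats c xs).2.1 := by
            have hb := hbest c; rw [hbv] at hb
            by_cases hlt : 0 < (pvStats c xs).2.1
            · rw [if_pos hlt] at hb
              exact ⟨Option.some_inj.mp hb, hlt⟩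
            · rw [if_neg hlt] at hb; exact absurd hb (by simp)
          obtain ⟨hp1, hp2⟩ := hps
          rw [hstat, hp1, hrune]
          dsimp only
          by_cases hgt : (pvStats c xs).1 + 1 > (pvStats c xs).2.1
          · rw [if_pos hgt, if_pos hgt, PySem.Dict.get?_insert, if_pos rfl]
            dsimp only
            rw [if_pos (by omega)]
          · rw [if_neg hgt, if_neg hgt, hbv, hp1]
            dsimp only
            rw [if_pos hp2]
      · obtain ⟨-, -, -, hr0c, hrmc, -, -, -, -, -, -⟩ := pvStats_spec c xs
        have hstat : pvStats c (xs ++ [v]) =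
            (0, (pvStats c xs).2.1, (pvStats c xs).2.2) := by
          rw [pvStats_append]
          simp only [pvStep]
          rw [if_neg (fun h : v = c => hcv h.symm),
            if_neg (by omega : ¬ (0 : Int) > (pvStats c xs).2.1)]
        rw [hstat]
        dsimp only
        have hget' : ∀ (q : Int × Int), (stp.1.insert v q).get? c = stp.1.get? c :=
          fun q => PySem.Dict.get?_insert_of_ne stp.1 q hcv
        cases hbv : stp.1.get? v with
        | none =>
          dsimp only
          rw [hget', hbest c]
        | some p =>
          dsimp only
          split
          · split
            · rw [hget', hbest c]
            · rw [hbest c]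
          · split
            · rw [hget', hbest c]
            · rw [hbest c]

-- ===== VERDICT (by name: the statement is the Claim_ definition above) =====
theorem getBaseIndices_spec : Claim_equal_getBaseIndices := by
  intro clusters _
  unfold Spec_getBaseIndices getBaseIndices getBaseIndices_alt
  rw [bDistinct_eq, bMain_eq_qRun]
  obtain ⟨hkeys, hget⟩ := pvA_fold (pvSetList clusters) (pvSetList_nodup clusters) clusters
    (fun v h => pvSetList_mem clusters h)
  obtain ⟨-, -, hbest⟩ := qRun_fold clusters
  rw [PySem.List.foldl_append_singleton_eq_map, List.nil_append, hkeys]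
  refine List.map_congr_left (fun c hc => ?_)
  obtain ⟨-, -, -, hr0, hrm, -, -, hme, -, hmax, hidx⟩ := pvStats_spec c clusters
  simp only [pvA_best]
  rw [hget c hc, hmax, hidx, hbest c]
  by_cases hm : 0 < (pvStats c clusters).2.1
  · rw [if_pos hm]
    rfl
  · rw [if_neg hm]
    have hmz : (pvStats c clusters).2.1 = 0 := le_antisymm (not_lt.mp hm) (le_trans hr0 hrm)
    rw [hmz, hme hmz]
    rfl
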